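-- pv_equiv track=rewrite | github.com/projectpai/pouw-main-iteration | pai/pouw/nodes/decentralized/message_map.py | decode_map_local
-- ===== SOURCE A (Python) =====
-- def is_upper_threshold(var):
--     return var & (1 << 31) > 0
--
-- def decode_map_local(map_local, structure, ranges):
--     upper_coord = [[] for i in range(len(ranges))]
--     lower_coord = [[] for i in range(len(ranges))]
--     for m in map_local:
--         is_upper = is_upper_threshold(m)
--         if is_upper:
--             m &= (~(1 << 31))
--
--         for i, r in enumerate(ranges):
--             if r[0] <= m <= r[1]:
--                 m -= r[0]
--                 if len(structure[i]) == 1: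
--                     if is_upper:
--                         upper_coord[i].append([m])
--                     else:
--                         lower_coord[i].append([m])
--                 else:
--                     if is_upper:
--                         upper_coord[i].append([m // structure[i][1], m % structure[i][1]])
--                     else:
--                         lower_coord[i].append([m // structure[i][1], m % structure[i][1]])
--                 break
--
--     return upper_coord, lower_coord
-- ===== SOURCE B (Python) =====
-- def decode_map_local(map_local, structure, ranges):
--     FLAG = 1 << 31
--
--     def split(m):
--         return (True, m & ~FLAG) if m & FLAG > 0 else (False, m)
--
--     def first(m):
--         return next(((i, r) for i, r in enumerate(ranges) if r[0] <= m <= r[1]), None)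
--
--     def decode(r, i, m):
--         d = m - r[0]
--         s = structure[i]
--         return [d] if len(s) == 1 else [d // s[1], d % s[1]]
--
--     tagged = [split(m) for m in map_local]
--     tagged = [(first(m), up, m) for up, m in tagged]
--
--     def bucket(i, want):
--         return [decode(hit[1], i, m) for hit, up, m in tagged
--                 if hit is not None and hit[0] == i and up == want]
--
--     upper = [bucket(i, True) for i in range(len(ranges))]
--     lower = [bucket(i, False) for i in range(len(ranges))]
--     return upper, lower
-- ===== Notes on version B (the rewrite author's own statement) =====
-- stated objective: alternative
-- what changed: B replaces A's single pass that mutates per-range bucket lists via an inner break-scan with a two-phase grouping: it first tags every element with its flag and first containing range, then builds each upper/lower bucket by a per-range comprehension over the tagged list.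
import Mathlib
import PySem

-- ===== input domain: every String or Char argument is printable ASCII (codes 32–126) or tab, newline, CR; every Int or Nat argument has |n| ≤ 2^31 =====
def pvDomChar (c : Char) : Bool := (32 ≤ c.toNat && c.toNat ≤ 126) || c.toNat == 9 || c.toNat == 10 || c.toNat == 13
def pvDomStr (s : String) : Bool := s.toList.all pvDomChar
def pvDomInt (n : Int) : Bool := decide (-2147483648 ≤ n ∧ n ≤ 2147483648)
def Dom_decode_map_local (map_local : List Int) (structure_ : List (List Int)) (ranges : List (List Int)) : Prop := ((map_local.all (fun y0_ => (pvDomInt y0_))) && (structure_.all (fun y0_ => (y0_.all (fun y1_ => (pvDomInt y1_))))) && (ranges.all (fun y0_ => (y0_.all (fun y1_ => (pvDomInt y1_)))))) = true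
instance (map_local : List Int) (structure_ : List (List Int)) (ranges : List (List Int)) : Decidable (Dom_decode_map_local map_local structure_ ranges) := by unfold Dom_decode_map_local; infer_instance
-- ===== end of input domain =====

-- B rebuilds the two coordinate tables by tagging each element with its first containing range and
-- then grouping per range (two-phase comprehension), instead of A's single mutating dispatch pass; alternative, same cost.


-- ===== PORT A =====
def is_upper_threshold (var : Int) : Bool := decide (PySem.Int.band var ((1 : Int) <<< (31 : Nat)) > 0)

-- the inner 'for i, r in enumerate(ranges)' loop with its break
def dml_inner (structure_ : List (List Int)) (l : List (Int × List Int)) (is_upper : Bool) (m : Int)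
    (upper lower : List (List (List Int))) : List (List (List Int)) × List (List (List Int)) :=
  match l with
  | [] => (upper, lower)
  | (i, r) :: rest =>
    if PySem.List.pyGetD r 0 0 ≤ m ∧ m ≤ PySem.List.pyGetD r 1 0 then
      let m2 := m - PySem.List.pyGetD r 0 0
      let s := PySem.List.pyGetD structure_ i []
      let entry := if s.length = 1 then [m2]
        else [PySem.Int.floordiv m2 (PySem.List.pyGetD s 1 0), PySem.Int.mod m2 (PySem.List.pyGetD s 1 0)]
      if is_upper then (PySem.List.pySetD upper i (PySem.List.pyGetD upper i [] ++ [entry]), lower)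
      else (upper, PySem.List.pySetD lower i (PySem.List.pyGetD lower i [] ++ [entry]))
    else dml_inner structure_ rest is_upper m upper lower

def decode_map_local (map_local : List Int) (structure_ : List (List Int)) (ranges : List (List Int)) :
    List (List (List Int)) × List (List (List Int)) :=
  let init : List (List (List Int)) := List.replicate ranges.length []
  map_local.foldl (fun st m =>
      let is_upper := is_upper_threshold m
      let m2 := if is_upper then PySem.Int.band m (Int.not ((1 : Int) <<< (31 : Nat))) else m
      dml_inner structure_ (PySem.List.enumerate ranges) is_upper m2 st.1 st.2)
    (init, init)

-- ===== PORT B =====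
def dml_split (m : Int) : Bool × Int :=
  if PySem.Int.band m ((1 : Int) <<< (31 : Nat)) > 0 then
    (true, PySem.Int.band m (Int.not ((1 : Int) <<< (31 : Nat))))
  else (false, m)

def dml_first (l : List (Int × List Int)) (m : Int) : Option (Int × List Int) :=
  match l with
  | [] => none
  | (i, r) :: rest =>
    if PySem.List.pyGetD r 0 0 ≤ m ∧ m ≤ PySem.List.pyGetD r 1 0 then some (i, r)
    else dml_first rest m

def dml_decode (structure_ : List (List Int)) (r : List Int) (i : Int) (m : Int) : List Int :=
  let d := m - PySem.List.pyGetD r 0 0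
  let s := PySem.List.pyGetD structure_ i []
  if s.length = 1 then [d]
  else [PySem.Int.floordiv d (PySem.List.pyGetD s 1 0), PySem.Int.mod d (PySem.List.pyGetD s 1 0)]

def dml_bucket (structure_ : List (List Int)) (tagged : List (Option (Int × List Int) × Bool × Int))
    (i : Int) (want : Bool) : List (List Int) :=
  tagged.filterMap (fun t => match t with
    | (some (j, r), up, m) => if j = i ∧ up = want then some (dml_decode structure_ r i m) else none
    | (none, _, _) => none)

def decode_map_local_alt (map_local : List Int) (structure_ : List (List Int)) (ranges : List (List Int)) :
    List (List (List Int)) × List (List (List Int)) :=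
  let tagged := map_local.map (fun m =>
    let p := dml_split m
    (dml_first (PySem.List.enumerate ranges) p.2, p.1, p.2))
  ((PySem.List.pyRange 0 (ranges.length : Int) 1).map (fun i => dml_bucket structure_ tagged i true),
   (PySem.List.pyRange 0 (ranges.length : Int) 1).map (fun i => dml_bucket structure_ tagged i false))

-- ===== PRECONDITION & SPEC =====
def pvStrip (m : Int) : Int :=
  if PySem.Int.band m ((1 : Int) <<< (31 : Nat)) > 0 then PySem.Int.band m (Int.not ((1 : Int) <<< (31 : Nat))) else m
def pvHit (m : Int) (r : List Int) : Bool := 2 ≤ r.length && r.getD 0 0 ≤ m && m ≤ r.getD 1 0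
def pvSafe (m : Int) (r : List Int) : Bool := !r.isEmpty && (!(r.getD 0 0 ≤ m) || 2 ≤ r.length)
def pvDecOK (structure_ : List (List Int)) (j : Nat) : Bool :=
  j < structure_.length &&
    ((structure_.getD j []).length == 1 ||
      (2 ≤ (structure_.getD j []).length && (structure_.getD j []).getD 1 0 != 0))

-- Pre_ = exactly the inputs on which Python A returns: every element's scan only meets ranges it can
-- index (r[0]/r[1] exist as needed), and the first hit, if any, has a valid structure entry (no
-- IndexError / ZeroDivisionError in the decode step).
def Pre_decode_map_local (map_local : List Int) (structure_ : List (List Int)) (ranges : List (List Int)) : Prop :=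
  ∀ m ∈ map_local,
    (∀ j < ranges.length, (∀ k < j, ¬ pvHit (pvStrip m) (ranges.getD k [])) → pvSafe (pvStrip m) (ranges.getD j [])) ∧
    (∀ j < ranges.length, pvHit (pvStrip m) (ranges.getD j []) →
      (∀ k < j, ¬ pvHit (pvStrip m) (ranges.getD k [])) → pvDecOK structure_ j)
instance (map_local : List Int) (structure_ : List (List Int)) (ranges : List (List Int)) : Decidable (Pre_decode_map_local map_local structure_ ranges) := by unfold Pre_decode_map_local; infer_instance

def pvWitness_decode_map_local : List Int × List (List Int) × List (List Int) :=
  ([2147483648, 1, -3], [[4], [2, 3]], [[0, 3], [4, 9]])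

def Spec_decode_map_local (map_local : List Int) (structure_ : List (List Int)) (ranges : List (List Int)) (out : List (List (List Int)) × List (List (List Int))) : Prop := out = decode_map_local_alt map_local structure_ ranges
instance (map_local : List Int) (structure_ : List (List Int)) (ranges : List (List Int)) (out : List (List (List Int)) × List (List (List Int))) : Decidable (Spec_decode_map_local map_local structure_ ranges out) := by unfold Spec_decode_map_local; infer_instance

-- ===== CLAIM (what is proved, stated in full; the proofs are below) =====
def Claim_equal_decode_map_local : Prop := ∀ (map_local : List Int) (structure_ : List (List Int)) (ranges : List (List Int)), Dom_decode_map_local map_local structure_ ranges → Pre_decode_map_local map_local structure_ ranges → Spec_decode_map_local map_local structure_ ranges (decode_map_local map_local structure_ ranges)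

-- ===== LEMMAS AND PROOFS =====

-- A's inner scan computes first-hit-then-update
lemma dml_inner_eq_first (structure_ : List (List Int)) (l : List (Int × List Int)) (up : Bool) (m : Int)
    (U L : List (List (List Int))) :
    dml_inner structure_ l up m U L =
      match dml_first l m with
      | none => (U, L)
      | some (i, r) =>
        if up then (PySem.List.pySetD U i (PySem.List.pyGetD U i [] ++ [dml_decode structure_ r i m]), L)
        else (U, PySem.List.pySetD L i (PySem.List.pyGetD L i [] ++ [dml_decode structure_ r i m])) := by
  induction l with
  | nil => rfl
  | cons hd rest ih =>
    obtain ⟨i, r⟩ := hd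
    by_cases h : PySem.List.pyGetD r 0 0 ≤ m ∧ m ≤ PySem.List.pyGetD r 1 0
    · simp [dml_inner, dml_first, dml_decode, h]
    · simp [dml_inner, dml_first, h, ih]

lemma dml_first_mem {l : List (Int × List Int)} {m : Int} {p : Int × List Int}
    (h : dml_first l m = some p) : p ∈ l := by
  induction l with
  | nil => simp [dml_first] at h
  | cons hd rest ih =>
    obtain ⟨i, r⟩ := hd
    by_cases hc : PySem.List.pyGetD r 0 0 ≤ m ∧ m ≤ PySem.List.pyGetD r 1 0
    · simp [dml_first, hc] at h; simp [h]
    · simp [dml_first, hc] at h; exact List.mem_cons_of_mem _ (ih h)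

lemma dml_bucket_cons_some (structure_ : List (List Int)) (j : Int) (r : List Int) (up : Bool) (m : Int)
    (rest : List (Option (Int × List Int) × Bool × Int)) (i : Int) (want : Bool) :
    dml_bucket structure_ ((some (j, r), up, m) :: rest) i want =
      if j = i ∧ up = want then dml_decode structure_ r i m :: dml_bucket structure_ rest i want
      else dml_bucket structure_ rest i want := by
  by_cases h : j = i ∧ up = want <;> simp [dml_bucket, h]

lemma dml_bucket_cons_none (structure_ : List (List Int)) (up : Bool) (m : Int)
    (rest : List (Option (Int × List Int) × Bool × Int)) (i : Int) (want : Bool) :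
    dml_bucket structure_ ((none, up, m) :: rest) i want = dml_bucket structure_ rest i want := by
  simp [dml_bucket]

lemma dml_split_fst (m : Int) : (dml_split m).1 = is_upper_threshold m := by
  by_cases h : PySem.Int.band m ((1 : Int) <<< (31 : Nat)) > 0 <;>
    simp [dml_split, is_upper_threshold, h]

lemma dml_split_snd (m : Int) :
    (dml_split m).2 = if is_upper_threshold m then PySem.Int.band m (Int.not ((1 : Int) <<< (31 : Nat))) else m := by
  by_cases h : PySem.Int.band m ((1 : Int) <<< (31 : Nat)) > 0 <;>
    simp [dml_split, is_upper_threshold, h]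

def dml_tag (ranges : List (List Int)) (ms : List Int) : List (Option (Int × List Int) × Bool × Int) :=
  ms.map (fun m => let p := dml_split m; (dml_first (PySem.List.enumerate ranges) p.2, p.1, p.2))

lemma pyGetD_pySetD_int {α : Type} (xs : List α) (i j : Int) (v d : α)
    (hi0 : 0 ≤ i) (hi : i < (xs.length : Int)) (hj0 : 0 ≤ j) :
    PySem.List.pyGetD (PySem.List.pySetD xs j v) i d = if i = j then v else PySem.List.pyGetD xs i d := by
  rw [PySem.List.pySetD_of_nonneg xs v hj0,
    PySem.List.pyGetD_eq_getElem _ d hi0 (by simpa using hi),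
    PySem.List.pyGetD_eq_getElem xs d hi0 hi,
    List.getElem_set]
  have heq : j.toNat = i.toNat ↔ i = j := by omega
  by_cases h : i = j
  · simp [h, heq.mpr h]
  · simp [h, heq.not.mpr h]

lemma dml_main (structure_ ranges : List (List Int)) (ms : List Int) :
    ∀ (U L : List (List (List Int))), U.length = ranges.length → L.length = ranges.length →
    ms.foldl (fun st m =>
        let is_upper := is_upper_threshold m
        let m2 := if is_upper then PySem.Int.band m (Int.not ((1 : Int) <<< (31 : Nat))) else m
        dml_inner structure_ (PySem.List.enumerate ranges) is_upper m2 st.1 st.2) (U, L)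
    = ((PySem.List.pyRange 0 (ranges.length : Int) 1).map
          (fun i => PySem.List.pyGetD U i [] ++ dml_bucket structure_ (dml_tag ranges ms) i true),
       (PySem.List.pyRange 0 (ranges.length : Int) 1).map
          (fun i => PySem.List.pyGetD L i [] ++ dml_bucket structure_ (dml_tag ranges ms) i false)) := by
  induction ms with
  | nil =>
    intro U L hU hL
    have h1 : List.map (fun i => PySem.List.pyGetD U i ([] : List (List Int)))
        (PySem.List.pyRange 0 (ranges.length : Int) 1) = U := by
      rw [← hU]; exact PySem.List.map_pyGetD_pyRange_zero' U ([] : List (List Int))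
    have h2 : List.map (fun i => PySem.List.pyGetD L i ([] : List (List Int)))
        (PySem.List.pyRange 0 (ranges.length : Int) 1) = L := by
      rw [← hL]; exact PySem.List.map_pyGetD_pyRange_zero' L ([] : List (List Int))
    have hb : ∀ (i : Int) (w : Bool), dml_bucket structure_ (dml_tag ranges []) i w = [] := by
      intro i w; rfl
    simp only [List.foldl_nil, hb, List.append_nil, h1, h2]
  | cons m rest ih =>
    intro U L hU hL
    simp only [List.foldl_cons]
    rw [dml_inner_eq_first]
    set m2 := if is_upper_threshold m then PySem.Int.band m (Int.not ((1 : Int) <<< (31 : Nat))) else m with hm2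
    have htag : dml_tag ranges (m :: rest)
        = (dml_first (PySem.List.enumerate ranges) m2, is_upper_threshold m, m2) :: dml_tag ranges rest := by
      simp only [dml_tag, List.map_cons]
      rw [dml_split_fst, dml_split_snd, ← hm2]
    cases hf : dml_first (PySem.List.enumerate ranges) m2 with
    | none =>
      rw [ih U L hU hL]
      refine Prod.ext ?_ ?_ <;>
      · apply List.map_congr_left
        intro i _
        rw [htag, hf, dml_bucket_cons_none]
    | some p =>
      obtain ⟨j, r⟩ := p
      have hjmem := dml_first_mem hf
      rw [PySem.List.mem_enumerate_iff] at hjmem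
      obtain ⟨k, hk, hp⟩ := hjmem
      have hj0 : 0 ≤ j := by simp at hp; omega
      have hjlt : j < (ranges.length : Int) := by simp at hp; omega
      rw [htag, hf]
      cases hup : is_upper_threshold m with
      | true =>
        simp only [if_true]
        rw [ih _ L (by rw [PySem.List.length_pySetD, hU]) hL]
        refine Prod.ext ?_ ?_
        · apply List.map_congr_left
          intro i hi
          rw [PySem.List.mem_pyRange_one] at hi
          rw [dml_bucket_cons_some,
            pyGetD_pySetD_int _ _ _ _ _ hi.1 (by rw [hU]; exact hi.2) hj0]
          by_cases hij : i = j
          · subst hij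
            simp [List.append_assoc]
          · rw [if_neg hij, if_neg (fun h => absurd h.1.symm hij)]
        · apply List.map_congr_left
          intro i _
          rw [dml_bucket_cons_some, if_neg (by simp)]
      | false =>
        simp only [Bool.false_eq_true, if_false]
        rw [ih U _ hU (by rw [PySem.List.length_pySetD, hL])]
        refine Prod.ext ?_ ?_
        · apply List.map_congr_left
          intro i _
          rw [dml_bucket_cons_some, if_neg (by simp)]
        · apply List.map_congr_left
          intro i hi
          rw [PySem.List.mem_pyRange_one] at hi
          rw [dml_bucket_cons_some,
            pyGetD_pySetD_int _ _ _ _ _ hi.1 (by rw [hL]; exact hi.2) hj0]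
          by_cases hij : i = j
          · subst hij
            simp [List.append_assoc]
          · rw [if_neg hij, if_neg (fun h => absurd h.1.symm hij)]

-- ===== VERDICT (by name: the statement is the Claim_ definition above) =====
theorem decode_map_local_spec : Claim_equal_decode_map_local := by
  intro map_local structure_ ranges _ _
  unfold Spec_decode_map_local decode_map_local decode_map_local_alt
  rw [dml_main structure_ ranges map_local _ _ (List.length_replicate) (List.length_replicate)]
  have hrep : ∀ i ∈ PySem.List.pyRange 0 (ranges.length : Int) 1,
      PySem.List.pyGetD (List.replicate ranges.length ([] : List (List Int))) i [] = [] := by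
    intro i hi
    rw [PySem.List.mem_pyRange_one] at hi
    rw [PySem.List.pyGetD_of_nonneg _ _ hi.1]
    exact List.getD_replicate _ (by omega)
  refine Prod.ext ?_ ?_ <;>
  · apply List.map_congr_left
    intro i hi
    rw [hrep i hi, List.nil_append]
    rfl
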